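-- pv_equiv track=rewrite | github.com/Malmevik/aoc | 2015/day5.py | InvalidStringCheck
-- ===== SOURCE A (Python) =====
-- def InvalidStringCheck(string):
--     invalid = {"ab": 1, "cd": 1, "pq": 1, "xy": 1}
--     invStrings = 0
--     for i, c in enumerate(string):
--         if i != 0:
--             j = string[i-1] + string[i]
--             invStrings += invalid.get(j, 0)
--             if  invStrings > 0:
--                 return False
--     return True
-- ===== SOURCE B (Python) =====
-- def InvalidStringCheck(string):
--     return not any(b in string for b in ("ab", "cd", "pq", "xy"))
-- ===== Notes on version B (the rewrite author's own statement) =====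
-- stated objective: idiomatic
-- what changed: Replaces the per-character enumerate loop maintaining a counter and a bigram dict by one substring-membership test per forbidden bigram.
import Mathlib
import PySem

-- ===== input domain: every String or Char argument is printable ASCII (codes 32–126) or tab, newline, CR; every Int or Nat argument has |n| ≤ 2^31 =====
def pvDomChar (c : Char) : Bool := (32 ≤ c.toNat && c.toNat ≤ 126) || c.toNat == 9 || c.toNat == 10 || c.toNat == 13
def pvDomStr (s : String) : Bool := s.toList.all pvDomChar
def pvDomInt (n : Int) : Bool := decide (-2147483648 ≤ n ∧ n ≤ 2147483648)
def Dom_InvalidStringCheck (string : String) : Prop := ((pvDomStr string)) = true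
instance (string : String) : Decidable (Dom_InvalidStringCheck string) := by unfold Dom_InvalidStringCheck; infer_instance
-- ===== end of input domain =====

-- B replaces A's per-character scan (dict of bigrams + counter with early return) by four
-- substring-membership tests, one per forbidden bigram — same return value, more idiomatic.

-- ===== PORT A =====
def ISC_invalid : PySem.Dict (List Char) Int :=
  PySem.Dict.ofList [(['a','b'], 1), (['c','d'], 1), (['p','q'], 1), (['x','y'], 1)]

-- the loop over enumerate(string); when i ≠ 0 both indices i-1, i are always in range,
-- so the pyGetD default is never read (string[i-1] + string[i] never raises)
def ISC_loop (s : List Char) (pairs : List (Int × Char)) (invStrings : Int) : Bool :=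
  match pairs with
  | [] => true
  | (i, _c) :: rest =>
    if i ≠ 0 then
      let j : List Char := [PySem.List.pyGetD s (i - 1) ' ', PySem.List.pyGetD s i ' ']
      let invStrings' := invStrings + ISC_invalid.getD j 0
      if invStrings' > 0 then false
      else ISC_loop s rest invStrings'
    else ISC_loop s rest invStrings

def InvalidStringCheck (string : String) : Bool :=
  ISC_loop string.toList (PySem.List.enumerate string.toList 0) 0

-- ===== PORT B =====
def InvalidStringCheck_alt (string : String) : Bool :=
  !(["ab", "cd", "pq", "xy"].any (fun b => PySem.Str.isIn b string))

-- ===== PRECONDITION & SPEC =====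
def Spec_InvalidStringCheck (string : String) (out : Bool) : Prop := out = InvalidStringCheck_alt string
instance (string : String) (out : Bool) : Decidable (Spec_InvalidStringCheck string out) := by unfold Spec_InvalidStringCheck; infer_instance

-- ===== CLAIM (what is proved, stated in full; the proofs are below) =====
def Claim_equal_InvalidStringCheck : Prop := ∀ (string : String), Dom_InvalidStringCheck string → Spec_InvalidStringCheck string (InvalidStringCheck string)

-- ===== LEMMAS AND PROOFS =====

-- proof-side: is (p, c) one of the four forbidden bigrams?
def ISC_forb (p c : Char) : Bool :=
  (p == 'a' && c == 'b') || (p == 'c' && c == 'd') || (p == 'p' && c == 'q') || (p == 'x' && c == 'y')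

-- proof-side recursive scan carrying the previous character
def ISC_chk (p : Char) (l : List Char) : Bool :=
  match l with
  | [] => true
  | c :: rest => if ISC_forb p c then false else ISC_chk c rest

-- the dict lookup A performs on a bigram is exactly the ISC_forb test
theorem ISC_getD_eq (p c : Char) :
    ISC_invalid.getD [p, c] 0 = if ISC_forb p c then 1 else 0 := by
  split_ifs with hf
  · simp only [ISC_forb, Bool.or_eq_true, Bool.and_eq_true, beq_iff_eq] at hf
    rcases hf with ((⟨rfl,rfl⟩|⟨rfl,rfl⟩)|⟨rfl,rfl⟩)|⟨rfl,rfl⟩ <;> decide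
  · simp only [ISC_forb, Bool.or_eq_true, Bool.and_eq_true, beq_iff_eq] at hf
    push Not at hf
    apply PySem.Dict.getD_of_not_contains
    have h : ISC_invalid = PySem.Dict.mk [(['a','b'], 1), (['c','d'], 1), (['p','q'], 1), (['x','y'], 1)] := by decide
    rw [h]
    simp [PySem.Dict.contains_mk]
    exact ⟨fun h1 h2 => hf.1.1.1 h1.symm h2.symm, fun h1 h2 => hf.1.1.2 h1.symm h2.symm,
           fun h1 h2 => hf.1.2 h1.symm h2.symm, fun h1 h2 => hf.2 h1.symm h2.symm⟩

-- A's loop from index k ≥ 1 is the previous-character scan over the tail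
theorem ISC_loop_drop (n : Nat) (s : List Char) (k : Nat)
    (hn : s.length - k = n) (hk : 1 ≤ k) :
    ISC_loop s (PySem.List.enumerate (s.drop k) (k : Int)) 0
      = ISC_chk (s.getD (k - 1) ' ') (s.drop k) := by
  induction n generalizing k with
  | zero =>
    have hd : s.drop k = [] := by
      rw [List.drop_eq_nil_iff]; omega
    rw [hd]
    simp [PySem.List.enumerate, ISC_loop, ISC_chk]
  | succ n ih =>
    have hlt : k < s.length := by omega
    have hd : s.drop k = s[k] :: s.drop (k + 1) := List.drop_eq_getElem_cons hlt
    have hgd : s.getD k ' ' = s[k] := by simp [List.getD_eq_getElem?_getD, hlt]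
    rw [hd, PySem.List.enumerate_cons]
    simp only [ISC_loop]
    rw [if_pos (show (k : Int) ≠ 0 from by omega)]
    have e1 : (k : Int) - 1 = ((k - 1 : Nat) : Int) := by omega
    simp only [e1, PySem.List.pyGetD_natCast, ISC_getD_eq, zero_add, hgd]
    rw [ISC_chk]
    set p := s.getD (k - 1) ' ' with hp
    by_cases hf : ISC_forb p s[k] = true
    · simp [hf]
    · rw [Bool.not_eq_true] at hf
      simp only [hf, Bool.false_eq_true, if_false, gt_iff_lt, lt_irrefl]
      have e2 : (k : Int) + 1 = ((k + 1 : Nat) : Int) := by omega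
      rw [e2, ih (k + 1) (by omega) (by omega)]
      simp [List.getElem?_eq_getElem hlt]

-- the scan returns true iff no forbidden bigram occurs as an infix of prev :: rest
theorem ISC_chk_iff (l : List Char) (p : Char) :
    ISC_chk p l = true ↔
      ∀ sub ∈ [['a','b'], ['c','d'], ['p','q'], ['x','y']], ¬ sub <:+: (p :: l) := by
  induction l generalizing p with
  | nil =>
    simp only [ISC_chk, true_iff]
    intro sub hsub hinf
    have := hinf.length_le
    simp only [List.mem_cons, List.not_mem_nil, or_false] at hsub
    rcases hsub with rfl | rfl | rfl | rfl <;> simp at this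
  | cons c rest ih =>
    rw [ISC_chk]
    split_ifs with hf
    · simp only [false_iff]
      intro hall
      simp only [ISC_forb, Bool.or_eq_true, Bool.and_eq_true, beq_iff_eq] at hf
      rcases hf with ((⟨rfl,rfl⟩|⟨rfl,rfl⟩)|⟨rfl,rfl⟩)|⟨rfl,rfl⟩ <;>
        first
          | exact hall ['a','b'] (by simp) ⟨[], rest, rfl⟩
          | exact hall ['c','d'] (by simp) ⟨[], rest, rfl⟩
          | exact hall ['p','q'] (by simp) ⟨[], rest, rfl⟩
          | exact hall ['x','y'] (by simp) ⟨[], rest, rfl⟩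
    · rw [ih c]
      constructor
      · intro hall sub hsub hinf
        rcases (List.infix_cons_iff.mp hinf) with hpre | hinf'
        · simp only [ISC_forb, Bool.or_eq_true, Bool.and_eq_true, beq_iff_eq] at hf
          simp only [List.mem_cons, List.not_mem_nil, or_false] at hsub
          rcases hsub with rfl | rfl | rfl | rfl <;>
            · rcases List.cons_prefix_cons.mp hpre with ⟨rfl, hpre'⟩
              rcases List.cons_prefix_cons.mp hpre' with ⟨rfl, -⟩
              simp at hf
        · exact hall sub hsub hinf'
      · intro hall sub hsub hinf
        exact hall sub hsub (List.infix_cons_iff.mpr (Or.inr hinf))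

-- ===== VERDICT (by name: the statement is the Claim_ definition above) =====
theorem InvalidStringCheck_spec : Claim_equal_InvalidStringCheck := by
  intro s _
  show InvalidStringCheck s = InvalidStringCheck_alt s
  have eIs : ∀ (b : String), PySem.Str.isIn b s = false ↔ ¬ (b.toList <:+: s.toList) := by
    intro b
    rw [Bool.eq_false_iff]
    exact not_congr (PySem.Str.isIn_iff_infix b s)
  have hB : (InvalidStringCheck_alt s = true) ↔
      ∀ sub ∈ [['a','b'], ['c','d'], ['p','q'], ['x','y']], ¬ sub <:+: s.toList := by
    rw [InvalidStringCheck_alt]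
    simp only [List.any_cons, List.any_nil, Bool.or_false, Bool.not_eq_true',
      Bool.or_eq_false_iff]
    rw [eIs "ab", eIs "cd", eIs "pq", eIs "xy",
      show ("ab" : String).toList = ['a','b'] from by decide,
      show ("cd" : String).toList = ['c','d'] from by decide,
      show ("pq" : String).toList = ['p','q'] from by decide,
      show ("xy" : String).toList = ['x','y'] from by decide]
    constructor
    · rintro ⟨h1, h2, h3, h4⟩ sub hsub
      simp only [List.mem_cons, List.not_mem_nil, or_false] at hsub
      rcases hsub with rfl | rfl | rfl | rfl <;> assumption
    · intro h
      exact ⟨h _ (by simp), h _ (by simp), h _ (by simp), h _ (by simp)⟩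
  have hA : (InvalidStringCheck s = true) ↔
      ∀ sub ∈ [['a','b'], ['c','d'], ['p','q'], ['x','y']], ¬ sub <:+: s.toList := by
    rw [InvalidStringCheck]
    match hs : s.toList with
    | [] =>
      simp only [PySem.List.enumerate, ISC_loop, true_iff]
      intro sub hsub hinf
      have hle := hinf.length_le
      simp only [List.mem_cons, List.not_mem_nil, or_false] at hsub
      rcases hsub with rfl | rfl | rfl | rfl <;> simp at hle
    | c :: cs =>
      rw [PySem.List.enumerate_cons]
      simp only [ISC_loop]
      rw [if_neg (fun h => h rfl)]
      rw [show PySem.List.enumerate cs ((0 : Int) + 1)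
            = PySem.List.enumerate ((c :: cs).drop 1) (((1 : Nat) : Int)) from by norm_num]
      rw [ISC_loop_drop ((c :: cs).length - 1) (c :: cs) 1 rfl (le_refl 1)]
      simp only [List.drop_one, List.tail_cons]
      rw [show (c :: cs).getD (1 - 1) ' ' = c from rfl]
      exact ISC_chk_iff cs c
  rw [Bool.eq_iff_iff, hA, hB]
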